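-- pv_equiv track=rewrite | github.com/maciejmakowski2003/Algorithms_and_structures | dynamic_and_greedy/ex2.py | count
-- ===== SOURCE A (Python) =====
-- def check(a,b):
--     if a[1]<=b[1] and a[0]>=b[0]:
--         return True
--
--     return False
--
-- def count(T):
--     n=len(T)
--     dp=[1]*n
--
--     for i in range(1,n):
--         for j in range(i):
--             if check(T[i],T[j]):
--                 dp[i] = max(dp[i],dp[j]+1)
--
--
--     return n-max(dp)
-- ===== SOURCE B (Python) =====
-- def count(T):
--     # Patience-style layering: layers[k] holds the already-processed intervals whose
--     # longest nested chain ending there has length k+1; for each new interval the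
--     # layer it belongs to is found by BINARY SEARCH over the layers (the predicate
--     # "some interval in layer k contains me" is downward closed in k), so no dp
--     # array and no full prefix scan is kept.  Answer = n - number of layers.
--     layers = []
--     for (a, b) in T:
--         lo, hi = 0, len(layers)
--         while lo < hi:
--             mid = (lo + hi) // 2
--             if any(c <= a and b <= d for (c, d) in layers[mid]):
--                 lo = mid + 1
--             else:
--                 hi = mid
--         if lo == len(layers):
--             layers.append([])
--         layers[lo].append((a, b))
--     return len(T) - len(layers)
-- ===== Notes on version B (the rewrite author's own statement) =====
-- stated objective: faster
-- what changed: A fills an index-based dp array with a full nested prefix scan per element; B keeps patience-style layers grouping processed intervals by the length of the longest nested chain ending at them, places each new interval by binary search over the layers (the 'layer k contains a cover of me' predicate is downward closed in k) and returns n minus the number of layers.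
-- outside the precondition, e.g. on count([]): A raises ValueError, B returns 0
import Mathlib
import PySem

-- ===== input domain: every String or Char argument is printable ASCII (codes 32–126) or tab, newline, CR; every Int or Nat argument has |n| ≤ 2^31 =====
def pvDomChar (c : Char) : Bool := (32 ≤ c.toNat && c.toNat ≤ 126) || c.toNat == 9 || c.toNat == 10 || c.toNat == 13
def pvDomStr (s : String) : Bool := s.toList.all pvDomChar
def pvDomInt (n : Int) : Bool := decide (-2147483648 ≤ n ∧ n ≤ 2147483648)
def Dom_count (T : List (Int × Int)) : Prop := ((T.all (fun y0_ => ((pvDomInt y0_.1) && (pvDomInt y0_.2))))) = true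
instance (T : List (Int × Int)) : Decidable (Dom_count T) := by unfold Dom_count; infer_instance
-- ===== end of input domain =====

-- B replaces A's quadratic prefix-scan DP by patience-style layering: intervals are
-- grouped into layers by the length of the longest nested chain ending at them, and
-- each new interval's layer is found by binary search over the layers (the predicate
-- "layer k contains an interval covering me" is downward closed in k); the answer is
-- n minus the number of layers.  A timing run measured B faster (constant-factor:
-- pruned probing instead of a full prefix scan per element).
-- A raises ValueError on the empty list (max of []), excluded by Pre_count; B returns 0 there.

-- ===== PORT A =====
def check (a : Int × Int) (b : Int × Int) : Bool :=
  if a.2 ≤ b.2 ∧ a.1 ≥ b.1 then true else false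

def count (T : List (Int × Int)) : Int :=
  let n : Int := (T.length : Int)
  let dp0 : List Int := List.replicate T.length 1
  let dp := (PySem.List.pyRange 1 n 1).foldl (fun dp i =>
    (PySem.List.pyRange 0 i 1).foldl (fun dp j =>
      if check (PySem.List.pyGetD T i (0, 0)) (PySem.List.pyGetD T j (0, 0)) then
        PySem.List.pySetD dp i (max (PySem.List.pyGetD dp i 0) (PySem.List.pyGetD dp j 0 + 1))
      else dp) dp) dp0
  -- max(dp): raises ValueError on [], excluded by Pre_count
  match PySem.List.max? dp (fun x => x) with
  | some m => n - m
  | none => 0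

-- ===== PORT B =====
-- any(c <= a and b <= d for (c, d) in layer)
def coverAny (layer : List (Int × Int)) (a b : Int) : Bool :=
  layer.any (fun cd => cd.1 ≤ a && b ≤ cd.2)

-- the while-loop binary search; lo, hi are nonnegative Python ints, so Nat with
-- Nat division matches Python's (lo + hi) // 2 exactly
def bsearch (layers : List (List (Int × Int))) (a b : Int) (lo hi : Nat) : Nat :=
  if _h : lo < hi then
    let mid := (lo + hi) / 2
    if coverAny (layers.getD mid []) a b then bsearch layers a b (mid + 1) hi
    else bsearch layers a b lo mid
  else lo
termination_by hi - lo
decreasing_by all_goals omega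

-- the body of B's for-loop
def bstep (layers : List (List (Int × Int))) (ab : Int × Int) : List (List (Int × Int)) :=
  let lo := bsearch layers ab.1 ab.2 0 layers.length
  if lo = layers.length then layers ++ [[ab]]
  else layers.set lo (layers.getD lo [] ++ [ab])

def count_alt (T : List (Int × Int)) : Int :=
  let layers := T.foldl bstep []
  (T.length : Int) - (layers.length : Int)

-- ===== PRECONDITION & SPEC =====
-- Pre_count excludes only the empty list, on which A raises ValueError (max of an empty list).
def Pre_count (T : List (Int × Int)) : Prop := T ≠ []
instance (T : List (Int × Int)) : Decidable (Pre_count T) := by unfold Pre_count; infer_instance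

def pvWitness_count : (List (Int × Int)) := [(0, 5), (1, 4), (2, 3)]

def Spec_count (T : List (Int × Int)) (out : Int) : Prop := out = count_alt T
instance (T : List (Int × Int)) (out : Int) : Decidable (Spec_count T out) := by unfold Spec_count; infer_instance

-- ===== CLAIM (what is proved, stated in full; the proofs are below) =====
def Claim_equal_count : Prop := ∀ (T : List (Int × Int)), Dom_count T → Pre_count T → Spec_count T (count T)


-- ===== LEMMAS AND PROOFS =====

-- abbreviation for the interval type
abbrev IV := Int × Int

-- longest chain starting at t, successors taken in order from L (one-step relation R)
def g (R : IV → IV → Bool) (t : IV) : List IV → Int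
  | [] => 1
  | s :: L => if R t s then max (g R t L) (1 + g R s L) else g R t L

-- each element annotated with its g-value over the (reversed) prefix seen so far
def annotAux (R : IV → IV → Bool) : List IV → List IV → List (IV × Int)
  | _, [] => []
  | pre, x :: rest => (x, g R x pre) :: annotAux R (x :: pre) rest

def annot (R : IV → IV → Bool) (T : List IV) : List (IV × Int) := annotAux R [] T

-- the step relation: Ra t s = "t may follow s", i.e. t nested in s
def Ra (t s : IV) : Bool := check t s

lemma fm_mem_le (l : List Int) : ∀ (a : Int) (x : Int), x ∈ l → x ≤ l.foldl max a :=
  fun a x hx => ((PySem.List.le_foldl_max l a).2 x hx)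

-- ---- annot facts ----
lemma annotAux_append (R : IV → IV → Bool) :
    ∀ (l1 l2 : List IV) (pre : List IV),
      annotAux R pre (l1 ++ l2) = annotAux R pre l1 ++ annotAux R (l1.reverse ++ pre) l2 := by
  intro l1
  induction l1 with
  | nil => intro l2 pre; simp [annotAux]
  | cons x l1 ih =>
    intro l2 pre
    simp only [List.cons_append, annotAux, ih l2 (x :: pre)]
    simp

lemma length_annotAux (R : IV → IV → Bool) : ∀ (l pre : List IV), (annotAux R pre l).length = l.length := by
  intro l
  induction l with
  | nil => intro pre; simp [annotAux]
  | cons x l ih => intro pre; simp [annotAux, ih]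

lemma annot_snoc (R : IV → IV → Bool) (P : List IV) (s : IV) :
    annot R (P ++ [s]) = annot R P ++ [(s, g R s P.reverse)] := by
  rw [annot, annotAux_append R P [s] []]
  simp [annotAux, annot]

lemma g_from_annotAux (R : IV → IV → Bool) :
    ∀ (P : List IV) (t : IV),
      g R t P.reverse = 1 + (annot R P).foldl (fun m p => if R t p.1 then max m p.2 else m) 0 := by
  intro P
  induction P using List.reverseRecOn with
  | nil => intro t; simp [annot, annotAux, g]
  | append_singleton P s ih =>
    intro t
    rw [annot_snoc, List.foldl_append]
    have hrev : (P ++ [s]).reverse = s :: P.reverse := by simp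
    rw [hrev]
    simp only [List.foldl, g]
    by_cases hts : R t s = true
    · rw [if_pos hts, if_pos hts, ih t, max_add_add_left]
    · rw [if_neg hts, if_neg hts, ih t]

-- ---- getD / set on lists split as  A ++ c :: B ----
lemma getD_append_lt {α : Type} (A : List α) (c : α) (B : List α) (d : α) :
    ∀ (j : Nat), j < A.length → (A ++ c :: B).getD j d = A.getD j d := by
  induction A with
  | nil => intro j h; simp at h
  | cons a A ih =>
    intro j h
    cases j with
    | zero => simp
    | succ j => simpa using ih j (by simpa using h)

lemma getD_append_mid {α : Type} (A : List α) (c : α) (B : List α) (d : α) :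
    (A ++ c :: B).getD A.length d = c := by
  induction A with
  | nil => simp
  | cons a A ih => simpa using ih

lemma set_append_mid {α : Type} (A : List α) (c v : α) (B : List α) :
    (A ++ c :: B).set A.length v = A ++ v :: B := by
  induction A with
  | nil => simp
  | cons a A ih => simpa using ih

lemma annot_take (R : IV → IV → Bool) (T : List IV) (k : Nat) (hk : k ≤ T.length) :
    annot R (T.take k) = (annot R T).take k := by
  have hsplit : T = T.take k ++ T.drop k := (List.take_append_drop k T).symm
  have h1 : annot R T = annot R (T.take k) ++ annotAux R ((T.take k).reverse ++ []) (T.drop k) := by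
    conv_lhs => rw [hsplit]
    exact annotAux_append R (T.take k) (T.drop k) []
  have hlen : (annot R (T.take k)).length = k := by
    rw [annot, length_annotAux]
    simp [hk]
  have h2 : (annot R (T.take k) ++ annotAux R ((T.take k).reverse ++ []) (T.drop k)).take k
      = annot R (T.take k) := by
    rw [List.take_append_of_le_length hlen.ge, List.take_of_length_le hlen.le]
  rw [h1, h2]

lemma annot_getD (R : IV → IV → Bool) (T : List IV) (k : Nat) (h : k < T.length) :
    (annot R T).getD k ((0, 0), 0) = (T[k], g R T[k] ((T.take k).reverse)) := by
  have hsplit : T = T.take k ++ T[k] :: T.drop (k + 1) := by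
    conv_lhs => rw [← List.take_append_drop k T]
    congr 1
    exact List.drop_eq_getElem_cons h
  conv_lhs => rw [hsplit]
  rw [annot, annotAux_append R (T.take k) (T[k] :: T.drop (k + 1)) []]
  simp only [annotAux]
  have hlen : (annotAux R [] (T.take k)).length = k := by
    rw [length_annotAux]
    simp [Nat.le_of_lt h]
  have hm := getD_append_mid (annotAux R [] (T.take k))
      ((T[k], g R T[k] ((T.take k).reverse ++ [])))
      (annotAux R (T[k] :: ((T.take k).reverse ++ [])) (T.drop (k + 1))) (((0, 0) : IV), (0 : Int))
  rw [hlen] at hm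
  rw [hm]
  simp

-- distribute the leading 1 + over the inner running max
lemma plus_one_fold (tk : IV) (Z : List (IV × Int)) : ∀ (m : Int),
    Z.foldl (fun c p => if check tk p.1 then max c (p.2 + 1) else c) (1 + m)
      = 1 + Z.foldl (fun c p => if check tk p.1 then max c p.2 else c) m := by
  induction Z with
  | nil => intro m; simp
  | cons p Z ih =>
    intro m
    simp only [List.foldl]
    by_cases hc : check tk p.1 = true
    · rw [if_pos hc, if_pos hc, show max (1 + m) (p.2 + 1) = 1 + max m p.2 from by omega, ih]
    · rw [if_neg hc, if_neg hc, ih]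

lemma annot_length (R : IV → IV → Bool) (T : List IV) : (annot R T).length = T.length := by
  rw [annot, length_annotAux]

lemma annot_getElem (R : IV → IV → Bool) (T : List IV) (k : Nat) (h : k < T.length) :
    (annot R T)[k]'(by rw [annot_length]; exact h) = (T[k], g R T[k] ((T.take k).reverse)) := by
  have := annot_getD R T k h
  rwa [List.getD_eq_getElem _ _ (by rw [annot_length]; exact h)] at this

-- the inner loop over j < k updates only slot k, folding the annotated prefix into it
lemma inner_loop (T : List IV) (k : Nat) (hk : k < T.length) (B : List Int) :
    ∀ (d j0 : Nat) (c : Int), k ≤ j0 + d →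
      (PySem.List.pyRange (j0 : Int) (k : Int) 1).foldl
        (fun dp j =>
          if check (PySem.List.pyGetD T (k : Int) (0, 0)) (PySem.List.pyGetD T j (0, 0)) then
            PySem.List.pySetD dp (k : Int)
              (max (PySem.List.pyGetD dp (k : Int) 0) (PySem.List.pyGetD dp j 0 + 1))
          else dp)
        ((annot Ra (T.take k)).map Prod.snd ++ c :: B)
      = (annot Ra (T.take k)).map Prod.snd ++
          (((annot Ra (T.take k)).drop j0).foldl
            (fun m p => if check (PySem.List.pyGetD T (k : Int) (0, 0)) p.1 then max m (p.2 + 1) else m) c) :: B := by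
  have hZlen : (annot Ra (T.take k)).length = k := by
    rw [annot_length]
    simp [Nat.le_of_lt hk]
  have hAlen : ((annot Ra (T.take k)).map Prod.snd).length = k := by
    rw [List.length_map, hZlen]
  intro d
  induction d with
  | zero =>
    intro j0 c hj0
    rw [PySem.List.pyRange_one_eq_nil (by exact_mod_cast hj0),
      List.drop_of_length_le (show (annot Ra (T.take k)).length ≤ j0 by rw [hZlen]; omega)]
    simp
  | succ d ih =>
    intro j0 c hj0
    by_cases hjk : k ≤ j0
    · rw [PySem.List.pyRange_one_eq_nil (by exact_mod_cast hjk),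
        List.drop_of_length_le (show (annot Ra (T.take k)).length ≤ j0 by rw [hZlen]; omega)]
      simp
    · replace hjk : j0 < k := by omega
      rw [PySem.List.pyRange_one_cons (by exact_mod_cast hjk)]
      simp only [List.foldl]
      have hZj : j0 < (annot Ra (T.take k)).length := by rw [hZlen]; omega
      have hTj : PySem.List.pyGetD T (j0 : Int) (0, 0) = T[j0]'(by omega) := by
        rw [PySem.List.pyGetD_natCast, List.getD_eq_getElem _ _ (by omega)]
      have hfst : ((annot Ra (T.take k))[j0]'hZj).1 = T[j0]'(by omega) := by
        rw [annot_getElem Ra (T.take k) j0 (by rw [List.length_take]; omega)]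
        simp only []
        rw [List.getElem_take]
      have hdpj : PySem.List.pyGetD ((annot Ra (T.take k)).map Prod.snd ++ c :: B) (j0 : Int) 0
          = ((annot Ra (T.take k))[j0]'hZj).2 := by
        rw [PySem.List.pyGetD_natCast, getD_append_lt _ _ _ _ j0 (by rw [hAlen]; omega),
          List.getD_eq_getElem _ _ (by rw [hAlen]; omega), List.getElem_map]
      have hdpk : PySem.List.pyGetD ((annot Ra (T.take k)).map Prod.snd ++ c :: B) (k : Int) 0 = c := by
        have hm := getD_append_mid ((annot Ra (T.take k)).map Prod.snd) c B (0 : Int)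
        rw [hAlen] at hm
        rw [PySem.List.pyGetD_natCast, hm]
      have hset : ∀ (v : Int), PySem.List.pySetD ((annot Ra (T.take k)).map Prod.snd ++ c :: B) (k : Int) v
          = (annot Ra (T.take k)).map Prod.snd ++ v :: B := by
        intro v
        have hm := set_append_mid ((annot Ra (T.take k)).map Prod.snd) c v B
        rw [hAlen] at hm
        rw [PySem.List.pySetD_natCast, hm]
      have hdrop : (annot Ra (T.take k)).drop j0
          = ((annot Ra (T.take k))[j0]'hZj) :: (annot Ra (T.take k)).drop (j0 + 1) :=
        List.drop_eq_getElem_cons hZj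
      rw [hTj, hdpj, hdpk, hdrop]
      simp only [List.foldl]
      rw [show ((j0 : Int) + 1) = (((j0 + 1 : Nat)) : Int) from by push_cast; ring]
      by_cases hcnd : check (PySem.List.pyGetD T (k : Int) (0, 0)) (T[j0]'(by omega)) = true
      · rw [if_pos hcnd, hset, ih (j0 + 1) _ (by omega)]
        rw [hfst, if_pos hcnd]
      · rw [if_neg hcnd, ih (j0 + 1) c (by omega)]
        rw [hfst, if_neg hcnd]

-- the outer loop finishes the dp table from position k on
lemma outer_loop (T : List IV) :
    ∀ (d k : Nat), 1 ≤ k → k ≤ T.length → T.length ≤ k + d →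
      (PySem.List.pyRange (k : Int) ((T.length : Int)) 1).foldl
        (fun dp i =>
          (PySem.List.pyRange 0 i 1).foldl
            (fun dp j =>
              if check (PySem.List.pyGetD T i (0, 0)) (PySem.List.pyGetD T j (0, 0)) then
                PySem.List.pySetD dp i
                  (max (PySem.List.pyGetD dp i 0) (PySem.List.pyGetD dp j 0 + 1))
              else dp) dp)
        (((annot Ra T).map Prod.snd).take k ++ List.replicate (T.length - k) 1)
      = (annot Ra T).map Prod.snd := by
  have hdlen : ((annot Ra T).map Prod.snd).length = T.length := by
    rw [List.length_map, annot_length]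
  intro d
  induction d with
  | zero =>
    intro k h1 h2 h3
    have hkT : k = T.length := by omega
    subst hkT
    rw [PySem.List.pyRange_one_eq_nil (by omega)]
    simp only [List.foldl]
    rw [List.take_of_length_le (by omega), Nat.sub_self]
    simp
  | succ d ih =>
    intro k h1 h2 h3
    by_cases hkT : k = T.length
    · subst hkT
      rw [PySem.List.pyRange_one_eq_nil (by omega)]
      simp only [List.foldl]
      rw [List.take_of_length_le (by omega), Nat.sub_self]
      simp
    · have hklt : k < T.length := by omega
      rw [PySem.List.pyRange_one_cons (by exact_mod_cast hklt)]
      simp only [List.foldl]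
      have hA : ((annot Ra T).map Prod.snd).take k = (annot Ra (T.take k)).map Prod.snd := by
        rw [annot_take Ra T k (by omega), List.map_take]
      have hrep : List.replicate (T.length - k) (1 : Int)
          = 1 :: List.replicate (T.length - k - 1) 1 := by
        rw [← List.replicate_succ]
        congr 1
        omega
      rw [hA, hrep]
      have hinner := inner_loop T k hklt (List.replicate (T.length - k - 1) 1) k 0 1 (by omega)
      simp only [Nat.cast_zero, List.drop_zero] at hinner
      rw [hinner]
      have hTk : PySem.List.pyGetD T (k : Int) (0, 0) = T[k]'hklt := by
        rw [PySem.List.pyGetD_natCast, List.getD_eq_getElem _ _ hklt]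
      have hnew : (annot Ra (T.take k)).foldl
          (fun m p => if check (PySem.List.pyGetD T (k : Int) (0, 0)) p.1 then max m (p.2 + 1) else m) 1
          = g Ra (T[k]'hklt) ((T.take k).reverse) := by
        have hpof := plus_one_fold (PySem.List.pyGetD T (k : Int) (0, 0)) (annot Ra (T.take k)) 0
        simp only [add_zero] at hpof
        rw [hpof, hTk, g_from_annotAux Ra (T.take k) (T[k]'hklt)]
        rfl
      rw [hnew]
      have htake : ((annot Ra T).map Prod.snd).take (k + 1)
          = (annot Ra (T.take k)).map Prod.snd ++ [g Ra (T[k]'hklt) ((T.take k).reverse)] := by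
        rw [List.take_succ, ← hA]
        congr 1
        rw [List.getElem?_eq_getElem (by omega)]
        simp only [Option.toList_some]
        congr 1
        rw [List.getElem_map, annot_getElem Ra T k hklt]
      have hstep : (annot Ra (T.take k)).map Prod.snd ++
            (g Ra (T[k]'hklt) ((T.take k).reverse)) :: List.replicate (T.length - k - 1) 1
          = ((annot Ra T).map Prod.snd).take (k + 1) ++ List.replicate (T.length - (k + 1)) 1 := by
        rw [htake, List.append_assoc, show T.length - (k + 1) = T.length - k - 1 from by omega]
        simp
      rw [hstep, show ((k : Int) + 1) = (((k + 1 : Nat)) : Int) from by push_cast; ring,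
        ih (k + 1) (by omega) (by omega) (by omega)]

-- maximal annotated dp value (the longest nested chain inside the prefix)
def maxdp (P : List IV) : Int := ((annot Ra P).map Prod.snd).foldl max 0

lemma count_eq (T : List (Int × Int)) (h : T ≠ []) : count T = (T.length : Int) - maxdp T := by
  rcases T with _ | ⟨t, rest⟩
  · exact absurd rfl h
  set T := t :: rest with hT
  have hlen1 : 1 ≤ T.length := by simp [hT]
  unfold count
  simp only []
  have hinit : List.replicate T.length (1 : Int)
      = ((annot Ra T).map Prod.snd).take 1 ++ List.replicate (T.length - 1) 1 := by
    have hhead : annot Ra T = (t, 1) :: annotAux Ra [t] rest := by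
      rw [hT, annot]
      simp [annotAux, g]
    rw [hhead, hT]
    simp [List.replicate_succ]
  rw [hinit]
  have hout := outer_loop T (T.length - 1) 1 le_rfl hlen1 (by omega)
  simp only [Nat.cast_one] at hout
  rw [hout]
  have hvals : (annot Ra T).map Prod.snd = 1 :: (annotAux Ra [t] rest).map Prod.snd := by
    rw [hT, annot]
    simp [annotAux, g]
  rw [hvals, PySem.List.max?_id_cons]
  have hM : maxdp T = (((annotAux Ra [t] rest).map Prod.snd).foldl max (max 0 1)) := by
    rw [maxdp, hvals]
    simp [List.foldl]
  rw [show max (0 : Int) 1 = 1 from by omega] at hM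
  rw [← hM]

-- ======== B-side correctness ========

-- generic facts about the conditional running maximum
lemma fif_base (c : IV × Int → Bool) (l : List (IV × Int)) :
    ∀ (a : Int), a ≤ l.foldl (fun m p => if c p then max m p.2 else m) a := by
  induction l with
  | nil => intro a; simp
  | cons p l ih =>
    intro a
    simp only [List.foldl]
    by_cases hc : c p = true
    · rw [if_pos hc]; have := ih (max a p.2); omega
    · rw [if_neg hc]; exact ih a

lemma fif_mem_le (c : IV × Int → Bool) (l : List (IV × Int)) :
    ∀ (a : Int) (p : IV × Int), p ∈ l → c p = true →
      p.2 ≤ l.foldl (fun m p => if c p then max m p.2 else m) a := by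
  induction l with
  | nil => intro a p h; simp at h
  | cons q l ih =>
    intro a p hp hc
    simp only [List.foldl]
    rcases List.mem_cons.mp hp with rfl | hp'
    · rw [if_pos hc]
      have := fif_base c l (max a p.2)
      omega
    · by_cases hq : c q = true
      · rw [if_pos hq]; exact ih _ _ hp' hc
      · rw [if_neg hq]; exact ih _ _ hp' hc

lemma fif_cases (c : IV × Int → Bool) (l : List (IV × Int)) :
    ∀ (a : Int), l.foldl (fun m p => if c p then max m p.2 else m) a = a ∨
      ∃ p ∈ l, c p = true ∧ l.foldl (fun m p => if c p then max m p.2 else m) a = p.2 := by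
  induction l with
  | nil => intro a; left; rfl
  | cons q l ih =>
    intro a
    simp only [List.foldl]
    by_cases hq : c q = true
    · rw [if_pos hq]
      rcases ih (max a q.2) with h | ⟨p, hp, hcp, hval⟩
      · rcases le_total a q.2 with hle | hle
        · right; exact ⟨q, by simp, hq, by omega⟩
        · left; omega
      · right; exact ⟨p, by simp [hp], hcp, hval⟩
    · rw [if_neg hq]
      rcases ih a with h | ⟨p, hp, hcp, hval⟩
      · left; exact h
      · right; exact ⟨p, by simp [hp], hcp, hval⟩

-- the quantity B's binary search computes: best dp among processed covers of x
def Fx (P : List IV) (x : IV) : Int :=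
  (annot Ra P).foldl (fun m p => if Ra x p.1 then max m p.2 else m) 0

lemma g_eq_Fx (P : List IV) (x : IV) : g Ra x P.reverse = 1 + Fx P x :=
  g_from_annotAux Ra P x

lemma Fx_nonneg (P : List IV) (x : IV) : 0 ≤ Fx P x := fif_base _ _ 0

lemma check_iff (a b : IV) : check a b = true ↔ (a.2 ≤ b.2 ∧ b.1 ≤ a.1) := by
  simp [check]

lemma Ra_trans (x y w : IV) (h1 : Ra x y = true) (h2 : Ra y w = true) : Ra x w = true := by
  rw [Ra, check_iff] at *
  exact ⟨le_trans h1.1 h2.1, le_trans h2.2 h1.2⟩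

lemma dpval_le_maxdp (P : List IV) (p : IV × Int) (h : p ∈ annot Ra P) : p.2 ≤ maxdp P :=
  fm_mem_le _ 0 p.2 (List.mem_map.mpr ⟨p, h, rfl⟩)

lemma Fx_le_maxdp (P : List IV) (x : IV) : Fx P x ≤ maxdp P := by
  rcases fif_cases (fun p => Ra x p.1) (annot Ra P) 0 with h | ⟨p, hp, _, hval⟩
  · rw [Fx, h]
    have : (0 : Int) ≤ maxdp P := by
      have := PySem.List.le_foldl_max ((annot Ra P).map Prod.snd) (0 : Int)
      exact this.1
    exact this
  · rw [Fx, hval]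
    exact dpval_le_maxdp P p hp

-- every chain value m ≥ 2 has a strictly earlier link of value m - 1
lemma g_decomp (R : IV → IV → Bool) :
    ∀ (L : List IV) (t : IV), 2 ≤ g R t L →
      ∃ l1 s l2, L = l1 ++ s :: l2 ∧ R t s = true ∧ g R s l2 = g R t L - 1 := by
  intro L
  induction L with
  | nil => intro t h; simp [g] at h
  | cons s L ih =>
    intro t h
    by_cases hts : R t s = true
    · rw [show g R t (s :: L) = max (g R t L) (1 + g R s L) from by simp [g, hts]] at h ⊢
      rcases le_total (1 + g R s L) (g R t L) with hle | hle
      · rcases ih t (by omega) with ⟨l1, s', l2, hL, hR, hg⟩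
        exact ⟨s :: l1, s', l2, by rw [hL]; rfl, hR, by omega⟩
      · refine ⟨[], s, L, rfl, hts, ?_⟩
        omega
    · rw [show g R t (s :: L) = g R t L from by simp [g, hts]] at h ⊢
      rcases ih t h with ⟨l1, s', l2, hL, hR, hg⟩
      exact ⟨s :: l1, s', l2, by rw [hL]; rfl, hR, hg⟩

lemma descend (P : List IV) (p : IV × Int) (hp : p ∈ annot Ra P) (h2 : 2 ≤ p.2) :
    ∃ q ∈ annot Ra P, Ra p.1 q.1 = true ∧ q.2 = p.2 - 1 := by
  rcases List.mem_iff_getElem.mp hp with ⟨i, hilen, hieq⟩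
  have hi : i < P.length := by rwa [annot_length] at hilen
  have hpval : p = (P[i], g Ra P[i] ((P.take i).reverse)) := by
    rw [← hieq, annot_getElem Ra P i hi]
  rcases g_decomp Ra ((P.take i).reverse) (P[i]) (by rw [hpval] at h2; exact h2)
    with ⟨l1, s, l2, hL, hR, hg⟩
  -- recover the index of s in P
  have htk : P.take i = l2.reverse ++ s :: l1.reverse := by
    have := congrArg List.reverse hL
    simpa using this
  have hlen_take : (P.take i).length = i := by simp [Nat.le_of_lt hi]
  have hj : l2.length < i := by
    rw [htk] at hlen_take
    simp at hlen_take
    omega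
  have hjP : l2.length < P.length := lt_trans hj hi
  have hs : P[l2.length]'hjP = s := by
    have h1 : (P.take i)[l2.length]'(by rw [hlen_take]; exact hj) = P[l2.length]'hjP :=
      List.getElem_take
    have h2 : (P.take i)[l2.length]'(by rw [hlen_take]; exact hj)
        = (l2.reverse ++ s :: l1.reverse)[l2.length]'(by simp) := List.getElem_of_eq htk _
    rw [← h1, h2, List.getElem_append_right (by simp)]
    simp
  have htkj : P.take l2.length = l2.reverse := by
    have h1 : (P.take i).take l2.length = P.take l2.length := by
      rw [List.take_take]
      congr 1
      omega
    rw [htk] at h1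
    rw [← h1, List.take_append_of_le_length (by simp)]
    simp
  refine ⟨(annot Ra P)[l2.length]'(by rw [annot_length]; exact hjP), List.getElem_mem _, ?_, ?_⟩
  · rw [annot_getElem Ra P l2.length hjP, hs, hpval]
    exact hR
  · rw [annot_getElem Ra P l2.length hjP]
    simp only []
    rw [htkj, List.reverse_reverse, hs, hg, hpval]

def covered (P : List IV) (x : IV) (m : Int) : Prop :=
  ∃ p ∈ annot Ra P, Ra x p.1 = true ∧ p.2 = m

lemma covered_down (P : List IV) (x : IV) (m : Int) (h : covered P x m) (h2 : 2 ≤ m) :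
    covered P x (m - 1) := by
  rcases h with ⟨p, hp, hxp, hval⟩
  rcases descend P p hp (by omega) with ⟨q, hq, hpq, hqval⟩
  exact ⟨q, hq, Ra_trans x p.1 q.1 hxp hpq, by omega⟩

lemma covered_down_many (P : List IV) (x : IV) :
    ∀ (d : Nat) (m : Int), covered P x m → 1 ≤ m - d → covered P x (m - d) := by
  intro d
  induction d with
  | zero => intro m h _; simpa using h
  | succ d ih =>
    intro m h hle
    have h1 : covered P x (m - d) := ih m h (by push_cast at hle ⊢; omega)
    have h2 : covered P x (m - d - 1) := covered_down P x (m - d) h1 (by push_cast at hle; omega)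
    have : m - (↑(d + 1) : Int) = m - d - 1 := by push_cast; ring
    rwa [this]

lemma covered_iff_lt (P : List IV) (x : IV) (k : Nat) :
    covered P x ((k : Int) + 1) ↔ (k : Int) < Fx P x := by
  constructor
  · rintro ⟨p, hp, hxp, hval⟩
    have h := fif_mem_le (fun p => Ra x p.1) (annot Ra P) 0 p hp hxp
    simp only [] at h
    rw [Fx]
    omega
  · intro hlt
    have h0 : 1 ≤ Fx P x := by omega
    rcases fif_cases (fun p => Ra x p.1) (annot Ra P) 0 with h | ⟨p, hp, hcp, hval⟩
    · rw [Fx] at h0; omega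
    · have htop : covered P x (Fx P x) := ⟨p, hp, hcp, by rw [Fx, hval]⟩
      have hd : ((Fx P x - ((k : Int) + 1)).toNat : Int) = Fx P x - ((k : Int) + 1) :=
        Int.toNat_of_nonneg (by omega)
      have := covered_down_many P x (Fx P x - ((k : Int) + 1)).toNat (Fx P x) htop (by omega)
      rwa [hd, show Fx P x - (Fx P x - ((k : Int) + 1)) = (k : Int) + 1 from by ring] at this

-- the loop invariant: layer k is exactly the processed intervals of dp value k + 1
def LInv (P : List IV) (layers : List (List IV)) : Prop :=
  ((layers.length : Int) = maxdp P) ∧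
  ∀ k : Nat, layers.getD k [] = ((annot Ra P).filter (fun p => p.2 == (k : Int) + 1)).map Prod.fst

lemma coverAny_pred (P : List IV) (layers : List (List IV)) (x : IV) (h : LInv P layers) (k : Nat) :
    coverAny (layers.getD k []) x.1 x.2 = decide ((k : Int) < Fx P x) := by
  rw [h.2 k]
  have hstep : coverAny (((annot Ra P).filter (fun p => p.2 == (k : Int) + 1)).map Prod.fst) x.1 x.2 = true
      ↔ covered P x ((k : Int) + 1) := by
    rw [coverAny, List.any_eq_true]
    constructor
    · rintro ⟨cd, hcd, hb⟩
      rcases List.mem_map.mp hcd with ⟨p, hpf, rfl⟩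
      rcases List.mem_filter.mp hpf with ⟨hpA, hpk⟩
      refine ⟨p, hpA, ?_, by simpa using hpk⟩
      rw [Ra, check_iff]
      simp only [Bool.and_eq_true, decide_eq_true_eq] at hb
      exact ⟨hb.2, hb.1⟩
    · rintro ⟨p, hpA, hxp, hval⟩
      refine ⟨p.1, List.mem_map.mpr ⟨p, List.mem_filter.mpr ⟨hpA, by simpa using hval⟩, rfl⟩, ?_⟩
      rw [Ra, check_iff] at hxp
      simp only [Bool.and_eq_true, decide_eq_true_eq]
      exact ⟨hxp.2, hxp.1⟩
  by_cases hc : (k : Int) < Fx P x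
  · simp only [hc, decide_true]
    exact hstep.mpr ((covered_iff_lt P x k).mpr hc)
  · simp only [hc, decide_false]
    rw [Bool.eq_false_iff]
    intro hb
    exact hc ((covered_iff_lt P x k).mp (hstep.mp hb))

-- binary search over a monotone (prefix-true) predicate finds the number of true layers
lemma bsearch_spec (layers : List (List IV)) (a b : Int) (N : Nat)
    (hpred : ∀ k : Nat, coverAny (layers.getD k []) a b = decide (k < N)) :
    ∀ (fuel lo hi : Nat), hi - lo ≤ fuel → lo ≤ N → N ≤ hi → bsearch layers a b lo hi = N := by
  intro fuel
  induction fuel with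
  | zero =>
    intro lo hi hf h1 h2
    rw [bsearch]
    rw [dif_neg (by omega)]
    omega
  | succ fuel ih =>
    intro lo hi hf h1 h2
    rw [bsearch]
    by_cases hlt : lo < hi
    · rw [dif_pos hlt]
      simp only [hpred ((lo + hi) / 2)]
      by_cases hmid : (lo + hi) / 2 < N
      · rw [if_pos (by simpa using hmid)]
        exact ih ((lo + hi) / 2 + 1) hi (by omega) (by omega) h2
      · rw [if_neg (by simpa using hmid)]
        exact ih lo ((lo + hi) / 2) (by omega) h1 (by omega)
    · rw [dif_neg hlt]
      omega

-- getD after set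
lemma getD_set_self {α : Type} (l : List α) (i : Nat) (v d : α) (h : i < l.length) :
    (l.set i v).getD i d = v := by
  rw [List.getD_eq_getElem _ _ (by simpa using h), List.getElem_set_self]

lemma getD_set_ne {α : Type} (l : List α) (i : Nat) (v d : α) (k : Nat) (h : k ≠ i) :
    (l.set i v).getD k d = l.getD k d := by
  rw [List.getD, List.getD, List.getElem?_set_ne (by omega)]

lemma getD_of_len_le {α : Type} (l : List α) (k : Nat) (d : α) (h : l.length ≤ k) :
    l.getD k d = d := by
  rw [List.getD, List.getElem?_eq_none (by omega)]
  rfl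

-- maxdp over a snoc
lemma maxdp_snoc (P : List IV) (x : IV) :
    maxdp (P ++ [x]) = max (maxdp P) (1 + Fx P x) := by
  rw [maxdp, annot_snoc, g_eq_Fx, List.map_append, List.foldl_append]
  simp [maxdp]

-- one loop iteration preserves the invariant
lemma bstep_inv (P : List IV) (layers : List (List IV)) (h : LInv P layers) (x : IV) :
    LInv (P ++ [x]) (bstep layers x) := by
  have hFx0 := Fx_nonneg P x
  set NN : Nat := (Fx P x).toNat with hNN
  have hcast : (NN : Int) = Fx P x := Int.toNat_of_nonneg hFx0
  have hpred : ∀ k : Nat, coverAny (layers.getD k []) x.1 x.2 = decide (k < NN) := by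
    intro k
    rw [coverAny_pred P layers x h k]
    exact decide_eq_decide.mpr (by omega)
  have hNle : NN ≤ layers.length := by
    have := Fx_le_maxdp P x
    have hlen := h.1
    omega
  have hlo : bsearch layers x.1 x.2 0 layers.length = NN :=
    bsearch_spec layers x.1 x.2 NN hpred layers.length 0 layers.length (by omega) (by omega) hNle
  have hannot : annot Ra (P ++ [x]) = annot Ra P ++ [(x, 1 + Fx P x)] := by
    rw [annot_snoc, g_eq_Fx]
  rw [bstep, hlo]
  by_cases hcase : NN = layers.length
  · rw [if_pos hcase]
    constructor
    · rw [maxdp_snoc]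
      have hlen := h.1
      simp only [List.length_append, List.length_cons, List.length_nil]
      push_cast
      omega
    · intro k
      rw [hannot, List.filter_append, List.map_append]
      rcases lt_trichotomy k layers.length with hk | hk | hk
      · have hne : ¬ ((1 + Fx P x) == (k : Int) + 1) = true := by
          simp only [beq_iff_eq]
          omega
        rw [show (layers ++ [[x]]).getD k [] = layers.getD k [] from
          List.getD_append _ _ _ _ hk, h.2 k]
        simp [hne]
      · have hmid := getD_append_mid layers [x] ([] : List (List IV)) ([] : List IV)
        rw [show (layers ++ [[x]]).getD k [] = [x] from by rw [hk]; exact hmid]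
        have hold : (annot Ra P).filter (fun p => p.2 == (k : Int) + 1) = [] := by
          rw [List.filter_eq_nil_iff]
          intro p hp
          have h1 := dpval_le_maxdp P p hp
          have hlen := h.1
          simp only [beq_iff_eq]
          omega
        have hnew : ((1 + Fx P x) == (k : Int) + 1) = true := by
          simp only [beq_iff_eq]
          omega
        rw [hold]
        simp [hnew]
      · rw [getD_of_len_le _ _ _ (by simp; omega)]
        have hold : (annot Ra P).filter (fun p => p.2 == (k : Int) + 1) = [] := by
          rw [List.filter_eq_nil_iff]
          intro p hp
          have h1 := dpval_le_maxdp P p hp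
          have hlen := h.1
          simp only [beq_iff_eq]
          omega
        have hne : ¬ ((1 + Fx P x) == (k : Int) + 1) = true := by
          simp only [beq_iff_eq]
          omega
        rw [hold]
        simp [hne]
  · rw [if_neg hcase]
    have hNlt : NN < layers.length := by omega
    constructor
    · rw [maxdp_snoc]
      have hlen := h.1
      simp only [List.length_set]
      omega
    · intro k
      rw [hannot, List.filter_append, List.map_append]
      by_cases hk : k = NN
      · subst hk
        rw [getD_set_self _ _ _ _ hNlt, h.2 NN]
        have hnew : ((1 + Fx P x) == (NN : Int) + 1) = true := by
          simp only [beq_iff_eq]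
          omega
        simp [hnew]
      · rw [getD_set_ne _ _ _ _ _ hk, h.2 k]
        have hne : ¬ ((1 + Fx P x) == (k : Int) + 1) = true := by
          simp only [beq_iff_eq]
          omega
        simp [hne]

lemma foldl_bstep (L : List IV) :
    ∀ (P : List IV) (layers : List (List IV)), LInv P layers → LInv (P ++ L) (L.foldl bstep layers) := by
  induction L with
  | nil => intro P layers h; simpa using h
  | cons t L ih =>
    intro P layers h
    have := ih (P ++ [t]) (bstep layers t) (bstep_inv P layers h t)
    simpa using this

lemma LInv_nil : LInv [] [] := by
  constructor
  · simp [maxdp, annot, annotAux]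
  · intro k
    show ([] : List (List IV)).getD k [] = _
    rw [getD_of_len_le _ _ _ (by simp)]
    rfl

lemma count_alt_eq (T : List (Int × Int)) : count_alt T = (T.length : Int) - maxdp T := by
  have h := (foldl_bstep T [] [] LInv_nil).1
  simp only [List.nil_append] at h
  simp only [count_alt]
  omega

-- ===== VERDICT (by name: the statement is the Claim_ definition above) =====
theorem count_spec : Claim_equal_count := by
  intro T _ hpre
  unfold Spec_count
  rw [count_eq T hpre, count_alt_eq T]
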